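-- pv_equiv track=rewrite | github.com/maoxiezhao/NeptuneEngine | tools/cjing_build/scripts/jsc.py | jsc_change_quotes
-- ===== SOURCE A (Python) =====
-- def jsc_get_string_index_list(string):
--     prev_c = ""
--     quote = ""
--     index_start = 0
--
--     str_list = []
--     for ic in range(0, len(string)):
--         c = string[ic]
--         if c == "'"  or  c == "\"":
--             if quote == "":
--                 quote = c
--                 index_start = ic
--
--             # \" 和 \' 视为字符串
--             elif quote == c and prev_c != "\\":
--                 quote = ""
--                 str_list.append((index_start, ic))
--
--         # \\ 不视为转义符
--         if prev_c == "\\" and c == "\\":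
--             prev_c = ""
--         else:
--             prev_c = c
--     return str_list
--
-- def jsc_check_in_string_index_list(string_list, index):
--     for index_slice in string_list:
--         if index <= index_slice[0]:
--             break
--         elif index < index_slice[1]:
--             return index_slice[1] + 1
--     return 0
--
-- def jsc_change_quotes(jsc):
--     ret = ""
--     string_list = jsc_get_string_index_list(jsc)
--     for ic in range(0, len(jsc)):
--         c = jsc[ic]
--         if c == "'":
--             if not jsc_check_in_string_index_list(string_list, ic):
--                 ret += "\""
--                 continue
--         ret += c
--     return ret
-- ===== SOURCE B (Python) =====
-- def jsc_change_quotes(jsc):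
--     # Single forward pass: buffer the body of the currently open string literal
--     # and flush it raw when the literal closes (quotes inside a closed literal
--     # are preserved); any other single quote is emitted as a double quote.
--     out = []
--     buf = []          # body of the currently open string literal, raw
--     quote = ''        # '' when outside a literal, else the opening quote char
--     prev = ''
--     for c in jsc:
--         if quote == '':
--             if c == "'" or c == '"':
--                 quote = c
--                 out.append('"' if c == "'" else c)
--             else:
--                 out.append(c)
--         else:
--             if c == quote and prev != '\\':
--                 out.extend(buf)
--                 buf = []
--                 out.append('"' if c == "'" else c)
--                 quote = ''
--             else:
--                 buf.append(c)
--         prev = '' if (prev == '\\' and c == '\\') else c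
--     # unterminated literal: its body belongs to no recorded string
--     out.extend('"' if c == "'" else c for c in buf)
--     return ''.join(out)
-- ===== Notes on version B (the rewrite author's own statement) =====
-- stated objective: faster
-- what changed: one forward pass that buffers the body of the currently open string literal and flushes it on close, replacing A's span-list precomputation plus a linear scan of the span list for every quote character
import Mathlib
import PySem

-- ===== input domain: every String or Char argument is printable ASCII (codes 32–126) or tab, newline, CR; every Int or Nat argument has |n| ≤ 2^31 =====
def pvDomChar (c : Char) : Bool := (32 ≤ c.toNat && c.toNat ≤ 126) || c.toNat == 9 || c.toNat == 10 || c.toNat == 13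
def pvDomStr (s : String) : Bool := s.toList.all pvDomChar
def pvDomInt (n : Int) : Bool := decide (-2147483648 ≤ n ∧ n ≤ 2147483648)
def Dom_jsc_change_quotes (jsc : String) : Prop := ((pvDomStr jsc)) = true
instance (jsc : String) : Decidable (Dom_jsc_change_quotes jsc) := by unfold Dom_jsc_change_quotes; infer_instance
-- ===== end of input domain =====

-- B is a single forward pass (buffering the open string literal) instead of A's span-list
-- precomputation plus a per-quote scan of the span list; same return value, measured faster.

-- ===== PORT A =====
-- loop body of jsc_get_string_index_list; state = (prev_c, quote, index_start, str_list)
def pvStepSpan (st : String × String × Int × List (Int × Int)) (icc : Int × Char) :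
    String × String × Int × List (Int × Int) :=
  let prev_c := st.1
  let quote := st.2.1
  let index_start := st.2.2.1
  let str_list := st.2.2.2
  let ic := icc.1
  let c := icc.2
  let prev_c' := if prev_c = "\\" ∧ c = '\\' then "" else String.ofList [c]
  if c = '\'' ∨ c = '"' then
    if quote = "" then
      (prev_c', String.ofList [c], ic, str_list)
    else if quote = String.ofList [c] ∧ prev_c ≠ "\\" then
      (prev_c', "", index_start, str_list ++ [(index_start, ic)])
    else (prev_c', quote, index_start, str_list)
  else (prev_c', quote, index_start, str_list)

def jsc_get_string_index_list (string : String) : List (Int × Int) :=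
  let cs := string.toList
  ((PySem.List.pyRange 0 (PySem.List.len cs) 1).foldl
    (fun st ic => pvStepSpan st (ic, PySem.List.pyGetD cs ic ' '))
    ("", "", 0, [])).2.2.2

def jsc_check_in_string_index_list (string_list : List (Int × Int)) (index : Int) : Int :=
  match string_list with
  | [] => 0
  | islice :: rest =>
    if index ≤ islice.1 then 0
    else if index < islice.2 then islice.2 + 1
    else jsc_check_in_string_index_list rest index

-- loop body of jsc_change_quotes ('if not check' on an int is 'check == 0')
def pvStepMain (string_list : List (Int × Int)) (ret : List Char) (icc : Int × Char) : List Char :=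
  if icc.2 = '\'' then
    if jsc_check_in_string_index_list string_list icc.1 = 0 then ret ++ ['"'] else ret ++ [icc.2]
  else ret ++ [icc.2]

def jsc_change_quotes (jsc : String) : String :=
  let cs := jsc.toList
  let string_list := jsc_get_string_index_list jsc
  String.ofList ((PySem.List.pyRange 0 (PySem.List.len cs) 1).foldl
    (fun ret ic => pvStepMain string_list ret (ic, PySem.List.pyGetD cs ic ' '))
    [])

-- ===== PORT B =====
-- loop body of B; state = (out, buf, quote, prev)
def pvStepAlt (st : List Char × List Char × String × String) (c : Char) :
    List Char × List Char × String × String :=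
  let out := st.1
  let buf := st.2.1
  let quote := st.2.2.1
  let prev := st.2.2.2
  let prev' := if prev = "\\" ∧ c = '\\' then "" else String.ofList [c]
  if quote = "" then
    if c = '\'' ∨ c = '"' then
      (out ++ [if c = '\'' then '"' else c], buf, String.ofList [c], prev')
    else (out ++ [c], buf, quote, prev')
  else
    if String.ofList [c] = quote ∧ prev ≠ "\\" then
      (out ++ buf ++ [if c = '\'' then '"' else c], [], "", prev')
    else (out, buf ++ [c], quote, prev')

def jsc_change_quotes_alt (jsc : String) : String :=
  let fin := jsc.toList.foldl pvStepAlt ([], [], "", "")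
  String.ofList (fin.1 ++ fin.2.1.map (fun c => if c = '\'' then '"' else c))

-- ===== PRECONDITION & SPEC =====
def Spec_jsc_change_quotes (jsc : String) (out : String) : Prop := out = jsc_change_quotes_alt jsc
instance (jsc : String) (out : String) : Decidable (Spec_jsc_change_quotes jsc out) := by unfold Spec_jsc_change_quotes; infer_instance

-- ===== CLAIM (what is proved, stated in full; the proofs are below) =====
def Claim_equal_jsc_change_quotes : Prop := ∀ (jsc : String), Dom_jsc_change_quotes jsc → Spec_jsc_change_quotes jsc (jsc_change_quotes jsc)

-- ===== LEMMAS AND PROOFS =====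

-- Python's prev_c update, shared verbatim by both loop bodies
def pvUpd (p : String) (c : Char) : String :=
  if p = "\\" ∧ c = '\\' then "" else String.ofList [c]

def pvRepl (c : Char) : Char := if c = '\'' then '"' else c

-- the string-span machine of jsc_get_string_index_list, written as recursion on the suffix
def pvSpansF (p q : String) (a i : Int) : List Char → List (Int × Int)
  | [] => []
  | c :: rest =>
    if c = '\'' ∨ c = '"' then
      if q = "" then pvSpansF (pvUpd p c) (String.ofList [c]) i (i + 1) rest
      else if q = String.ofList [c] ∧ p ≠ "\\" then
        (a, i) :: pvSpansF (pvUpd p c) "" a (i + 1) rest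
      else pvSpansF (pvUpd p c) q a (i + 1) rest
    else pvSpansF (pvUpd p c) q a (i + 1) rest

-- the main loop of A, written as recursion on the suffix
def pvEmit (sl : List (Int × Int)) : Int → List Char → List Char
  | _, [] => []
  | i, c :: rest =>
    (if c = '\'' then (if jsc_check_in_string_index_list sl i = 0 then '"' else c) else c)
      :: pvEmit sl (i + 1) rest

-- B as a recursive scanner: outside / inside an open string literal
mutual
def pvScanOut (p : String) : List Char → List Char
  | [] => []
  | c :: rest =>
    if c = '\'' ∨ c = '"' then pvRepl c :: (pvScanIn c (pvUpd p c) rest).1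
    else c :: pvScanOut (pvUpd p c) rest
def pvScanIn (q : Char) (p : String) : List Char → List Char × Bool
  | [] => ([], false)
  | c :: rest =>
    if c = q ∧ p ≠ "\\" then (pvRepl c :: pvScanOut (pvUpd p c) rest, true)
    else
      let r := pvScanIn q (pvUpd p c) rest
      ((if r.2 then c else pvRepl c) :: r.1, r.2)
end

lemma pvMkNe (c : Char) : String.ofList [c] ≠ "" := by
  simp

lemma pvMkEqMk (c q : Char) : (String.ofList [c] = String.ofList [q]) ↔ c = q := by
  constructor
  · intro h; have := congrArg String.toList h; simpa using this
  · intro h; rw [h]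

-- cited library route for 'for i in range(len(cs))' reading cs[i] while also using i
lemma pvFoldRange {α : Type} (cs : List Char) (f : α → Int × Char → α) (init : α) :
    (PySem.List.pyRange 0 (PySem.List.len cs) 1).foldl
      (fun st ic => f st (ic, PySem.List.pyGetD cs ic ' ')) init
    = (PySem.List.enumerate cs 0).foldl f init := by
  rw [PySem.List.enumerate_eq_map_pyRange (d := ' '), List.foldl_map]

-- bridge: A's span fold over enumerated characters equals pvSpansF
lemma pvSpanFold : ∀ (cs : List Char) (s : Int) (p q : String) (a : Int) (L : List (Int × Int)),
    ((PySem.List.enumerate cs s).foldl pvStepSpan (p, q, a, L)).2.2.2 = L ++ pvSpansF p q a s cs := by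
  intro cs
  induction cs with
  | nil => intro s p q a L; simp [PySem.List.enumerate_nil, pvSpansF]
  | cons c cs ih =>
    intro s p q a L
    rw [PySem.List.enumerate_cons, List.foldl_cons]
    simp only [pvSpansF, pvStepSpan, pvUpd]
    split_ifs <;> simp [ih]

-- bridge: A's main fold over enumerated characters equals pvEmit
lemma pvMainFold : ∀ (cs : List Char) (s : Int) (sl : List (Int × Int)) (acc : List Char),
    (PySem.List.enumerate cs s).foldl (pvStepMain sl) acc = acc ++ pvEmit sl s cs := by
  intro cs
  induction cs with
  | nil => intro s sl acc; simp [PySem.List.enumerate_nil, pvEmit]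
  | cons c cs ih =>
    intro s sl acc
    rw [PySem.List.enumerate_cons, List.foldl_cons]
    simp only [pvEmit, pvStepMain]
    split_ifs <;> simp [ih]

lemma pvA_eq (jsc : String) :
    jsc_change_quotes jsc = String.ofList (pvEmit (pvSpansF "" "" 0 0 jsc.toList) 0 jsc.toList) := by
  have hs : jsc_get_string_index_list jsc = pvSpansF "" "" 0 0 jsc.toList := by
    unfold jsc_get_string_index_list
    dsimp only
    rw [pvFoldRange, pvSpanFold]
    simp
  unfold jsc_change_quotes
  dsimp only
  rw [hs, pvFoldRange, pvMainFold]
  simp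

lemma pvStepAlt_open (out buf : List Char) (p : String) (c : Char) (h1 : c = '\'' ∨ c = '"') :
    pvStepAlt (out, buf, "", p) c
      = (out ++ [if c = '\'' then '"' else c], buf, String.ofList [c], pvUpd p c) := by
  simp [pvStepAlt, pvUpd, h1]

lemma pvStepAlt_plain (out buf : List Char) (p : String) (c : Char) (h1 : ¬ (c = '\'' ∨ c = '"')) :
    pvStepAlt (out, buf, "", p) c = (out ++ [c], buf, "", pvUpd p c) := by
  simp [pvStepAlt, pvUpd, h1]

lemma pvStepAlt_close (out buf : List Char) (p : String) (c qc : Char) (h : c = qc ∧ p ≠ "\\") :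
    pvStepAlt (out, buf, String.ofList [qc], p) c
      = (out ++ buf ++ [if c = '\'' then '"' else c], [], "", pvUpd p c) := by
  have : String.ofList [c] = String.ofList [qc] ∧ p ≠ "\\" := ⟨(pvMkEqMk c qc).2 h.1, h.2⟩
  simp [pvStepAlt, pvUpd, pvMkNe qc, this]

lemma pvStepAlt_stay (out buf : List Char) (p : String) (c qc : Char) (h : ¬ (c = qc ∧ p ≠ "\\")) :
    pvStepAlt (out, buf, String.ofList [qc], p) c
      = (out, buf ++ [c], String.ofList [qc], pvUpd p c) := by
  have h2 : ¬ (String.ofList [c] = String.ofList [qc] ∧ p ≠ "\\") := by rw [pvMkEqMk]; exact h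
  simp [pvStepAlt, pvUpd, pvMkNe qc, h2]

-- bridge: B's fold equals the recursive scanner
lemma pvAltScan : ∀ (cs : List Char) (p : String) (out : List Char),
    ((cs.foldl pvStepAlt (out, [], "", p)).1
       ++ (cs.foldl pvStepAlt (out, [], "", p)).2.1.map pvRepl = out ++ pvScanOut p cs) ∧
    (∀ (qc : Char) (buf : List Char),
      (cs.foldl pvStepAlt (out, buf, String.ofList [qc], p)).1
        ++ (cs.foldl pvStepAlt (out, buf, String.ofList [qc], p)).2.1.map pvRepl
      = out ++ (if (pvScanIn qc p cs).2 then buf ++ (pvScanIn qc p cs).1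
                else buf.map pvRepl ++ (pvScanIn qc p cs).1)) := by
  intro cs
  induction cs with
  | nil =>
    intro p out
    refine ⟨by simp [pvScanOut], ?_⟩
    intro qc buf
    simp [pvScanIn]
  | cons c cs ih =>
    intro p out
    constructor
    · rw [List.foldl_cons]
      by_cases h1 : c = '\'' ∨ c = '"'
      · rw [pvStepAlt_open out [] p c h1]
        rw [(ih (pvUpd p c) (out ++ [if c = '\'' then '"' else c])).2 c []]
        simp [pvScanOut, h1, pvRepl]
      · rw [pvStepAlt_plain out [] p c h1]
        rw [(ih (pvUpd p c) (out ++ [c])).1]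
        simp [pvScanOut, h1]
    · intro qc buf
      rw [List.foldl_cons]
      by_cases h2 : c = qc ∧ p ≠ "\\"
      · rw [pvStepAlt_close out buf p c qc h2]
        rw [(ih (pvUpd p c) (out ++ buf ++ [if c = '\'' then '"' else c])).1]
        simp [pvScanIn, h2, pvRepl]
      · rw [pvStepAlt_stay out buf p c qc h2]
        rw [(ih (pvUpd p c) out).2 qc (buf ++ [c])]
        simp only [pvScanIn, if_neg h2]
        by_cases hr : (pvScanIn qc (pvUpd p c) cs).2 <;> simp [hr]

lemma pvB_eq (jsc : String) :
    jsc_change_quotes_alt jsc = String.ofList (pvScanOut "" jsc.toList) := by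
  unfold jsc_change_quotes_alt
  dsimp only
  rw [← List.nil_append (pvScanOut "" jsc.toList)]
  exact congrArg String.ofList (pvAltScan jsc.toList "" []).1

-- every span produced from index i onwards starts at i or later (outside a literal) / at a or later
lemma pvSpansF_lb : ∀ (cs : List Char) (p q : String) (a i : Int),
    ∀ xy ∈ pvSpansF p q a i cs, (if q = "" then i else min a i) ≤ xy.1 := by
  intro cs
  induction cs with
  | nil => intro p q a i xy h; simp [pvSpansF] at h
  | cons c cs ih =>
    intro p q a i xy h
    simp only [pvSpansF] at h
    split_ifs at h with h1 h2 h3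
    · have := ih _ _ _ _ xy h
      rw [if_neg (pvMkNe c)] at this
      simp only [if_pos h2]
      omega
    · rw [List.mem_cons] at h
      rw [if_neg h2]
      rcases h with h | h
      · subst h; simp
      · have := ih _ _ _ _ xy h
        omega
    · have := ih _ _ _ _ xy h
      split_ifs at this ⊢
      all_goals omega
    · have := ih _ _ _ _ xy h
      split_ifs at this ⊢
      all_goals omega

lemma pvCheck_zero_of_lb (F : List (Int × Int)) (j : Int) (h : ∀ xy ∈ F, j < xy.1) :
    jsc_check_in_string_index_list F j = 0 := by
  cases F with
  | nil => rfl
  | cons xy rest =>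
    have := h xy List.mem_cons_self
    simp only [jsc_check_in_string_index_list]
    rw [if_pos (by omega)]

lemma pvEmit_skip : ∀ (cs : List Char) (F' : List (Int × Int)) (x y j : Int), x < j → y ≤ j →
    pvEmit ((x, y) :: F') j cs = pvEmit F' j cs := by
  intro cs
  induction cs with
  | nil => intro F' x y j _ _; rfl
  | cons c cs ih =>
    intro F' x y j hx hy
    simp only [pvEmit, jsc_check_in_string_index_list]
    rw [if_neg (by omega : ¬ j ≤ x), if_neg (by omega : ¬ j < y)]
    rw [ih F' x y (j + 1) (by omega) (by omega)]

-- inside an open literal: the scanner closes iff the machine records a span, whose start is a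
lemma pvScanInClose : ∀ (cs : List Char) (qc : Char) (p : String) (a i : Int),
    (qc = '\'' ∨ qc = '"') →
    ((pvScanIn qc p cs).2 = false ∧ pvSpansF p (String.ofList [qc]) a i cs = []) ∨
    (∃ y F', (pvScanIn qc p cs).2 = true ∧
      pvSpansF p (String.ofList [qc]) a i cs = (a, y) :: F' ∧ i ≤ y) := by
  intro cs
  induction cs with
  | nil => intro qc p a i _; left; simp [pvScanIn, pvSpansF]
  | cons c cs ih =>
    intro qc p a i hqc
    by_cases hcl : c = qc ∧ p ≠ "\\"
    · right
      have h1 : c = '\'' ∨ c = '"' := hcl.1 ▸ hqc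
      have h3 : String.ofList [qc] = String.ofList [c] ∧ p ≠ "\\" :=
        ⟨(pvMkEqMk qc c).2 hcl.1.symm, hcl.2⟩
      refine ⟨i, pvSpansF (pvUpd p c) "" a (i + 1) cs, ?_, ?_, le_refl i⟩
      · simp [pvScanIn, hcl]
      · simp only [pvSpansF, if_pos h1, if_neg (pvMkNe qc), if_pos h3]
    · have hrec : pvSpansF p (String.ofList [qc]) a i (c :: cs)
          = pvSpansF (pvUpd p c) (String.ofList [qc]) a (i + 1) cs := by
        have h3 : ¬ (String.ofList [qc] = String.ofList [c] ∧ p ≠ "\\") := by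
          rw [pvMkEqMk]
          intro hk; exact hcl ⟨hk.1.symm, hk.2⟩
        by_cases h1 : c = '\'' ∨ c = '"'
        · simp only [pvSpansF, if_pos h1, if_neg (pvMkNe qc), if_neg h3]
        · simp only [pvSpansF, if_neg h1]
      have hscan : (pvScanIn qc p (c :: cs)).2 = (pvScanIn qc (pvUpd p c) cs).2 := by
        simp [pvScanIn, hcl]
      rcases ih qc (pvUpd p c) a (i + 1) hqc with ⟨hb, hF⟩ | ⟨y, F', hb, hF, hy⟩
      · left; rw [hrec, hscan]; exact ⟨hb, hF⟩
      · right; exact ⟨y, F', by rw [hscan]; exact hb, by rw [hrec]; exact hF, by omega⟩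

-- the crux: A's emit over the machine's spans is B's scanner
lemma pvEmitSpans : ∀ (cs : List Char) (p : String) (a i : Int), 0 ≤ i →
    (pvEmit (pvSpansF p "" a i cs) i cs = pvScanOut p cs) ∧
    (∀ qc : Char, (qc = '\'' ∨ qc = '"') → a < i →
      pvEmit (pvSpansF p (String.ofList [qc]) a i cs) i cs = (pvScanIn qc p cs).1) := by
  intro cs
  induction cs with
  | nil =>
    intro p a i _
    exact ⟨by simp [pvEmit, pvScanOut],
      fun qc _ _ => by simp [pvEmit, pvScanIn]⟩
  | cons c cs ih =>
    intro p a i hi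
    constructor
    · by_cases h1 : c = '\'' ∨ c = '"'
      · have hF : pvSpansF p "" a i (c :: cs)
            = pvSpansF (pvUpd p c) (String.ofList [c]) i (i + 1) cs := by
          simp [pvSpansF, h1]
        have hchk : jsc_check_in_string_index_list
            (pvSpansF (pvUpd p c) (String.ofList [c]) i (i + 1) cs) i = 0 := by
          rcases pvScanInClose cs c (pvUpd p c) i (i + 1) h1 with ⟨_, hF0⟩ | ⟨y, F', _, hF0, hy⟩
          · rw [hF0]; rfl
          · rw [hF0]
            simp only [jsc_check_in_string_index_list]
            rw [if_pos (le_refl i)]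
        rw [hF]
        simp only [pvEmit, hchk]
        rw [(ih (pvUpd p c) i (i + 1) (by omega)).2 c h1 (by omega)]
        simp [pvScanOut, h1, pvRepl]
      · have hF : pvSpansF p "" a i (c :: cs) = pvSpansF (pvUpd p c) "" a (i + 1) cs := by
          simp only [pvSpansF, if_neg h1]
        rw [hF]
        simp only [pvEmit]
        rw [(ih (pvUpd p c) a (i + 1) (by omega)).1]
        have hc : ¬ c = '\'' := fun h => h1 (Or.inl h)
        simp only [pvScanOut, if_neg h1, if_neg hc]
    · intro qc hqc ha
      by_cases hcl : c = qc ∧ p ≠ "\\"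
      · have h1 : c = '\'' ∨ c = '"' := hcl.1 ▸ hqc
        have h3 : String.ofList [qc] = String.ofList [c] ∧ p ≠ "\\" :=
          ⟨(pvMkEqMk qc c).2 hcl.1.symm, hcl.2⟩
        have hF : pvSpansF p (String.ofList [qc]) a i (c :: cs)
            = (a, i) :: pvSpansF (pvUpd p c) "" a (i + 1) cs := by
          simp only [pvSpansF, if_pos h1, if_neg (pvMkNe qc), if_pos h3]
        have hchk : jsc_check_in_string_index_list
            ((a, i) :: pvSpansF (pvUpd p c) "" a (i + 1) cs) i = 0 := by
          simp only [jsc_check_in_string_index_list]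
          rw [if_neg (by omega), if_neg (by omega)]
          apply pvCheck_zero_of_lb
          intro xy hxy
          have h5 : i + 1 ≤ xy.1 := by
            have := pvSpansF_lb cs (pvUpd p c) "" a (i + 1) xy hxy
            simpa using this
          omega
        rw [hF]
        simp only [pvEmit, hchk]
        rw [pvEmit_skip cs (pvSpansF (pvUpd p c) "" a (i + 1) cs) a i (i + 1) (by omega) (by omega)]
        rw [(ih (pvUpd p c) a (i + 1) (by omega)).1]
        simp [pvScanIn, hcl, pvRepl]
      · have hrec : pvSpansF p (String.ofList [qc]) a i (c :: cs)
            = pvSpansF (pvUpd p c) (String.ofList [qc]) a (i + 1) cs := by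
          have h3 : ¬ (String.ofList [qc] = String.ofList [c] ∧ p ≠ "\\") := by
            rw [pvMkEqMk]
            intro hk; exact hcl ⟨hk.1.symm, hk.2⟩
          by_cases h1 : c = '\'' ∨ c = '"'
          · simp only [pvSpansF, if_pos h1, if_neg (pvMkNe qc), if_neg h3]
          · simp only [pvSpansF, if_neg h1]
        rw [hrec]
        rcases pvScanInClose cs qc (pvUpd p c) a (i + 1) hqc with ⟨hb, hF0⟩ | ⟨y, F', hb, hF0, hy⟩
        · have hchk : jsc_check_in_string_index_list
              (pvSpansF (pvUpd p c) (String.ofList [qc]) a (i + 1) cs) i = 0 := by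
            rw [hF0]; rfl
          simp only [pvEmit, hchk]
          rw [(ih (pvUpd p c) a (i + 1) (by omega)).2 qc hqc (by omega)]
          simp [pvScanIn, hcl, hb, pvRepl]
        · have hchk : ¬ jsc_check_in_string_index_list
              (pvSpansF (pvUpd p c) (String.ofList [qc]) a (i + 1) cs) i = 0 := by
            rw [hF0]
            simp only [jsc_check_in_string_index_list]
            rw [if_neg (by omega), if_pos (by omega)]
            omega
          have hhead : (if c = '\'' then
              (if jsc_check_in_string_index_list
                  (pvSpansF (pvUpd p c) (String.ofList [qc]) a (i + 1) cs) i = 0 then '"' else c)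
              else c) = c := by
            by_cases hc1 : c = '\''
            · rw [if_pos hc1, if_neg hchk]
            · rw [if_neg hc1]
          simp only [pvEmit, hhead]
          rw [(ih (pvUpd p c) a (i + 1) (by omega)).2 qc hqc (by omega)]
          simp [pvScanIn, hcl, hb]

-- ===== VERDICT (by name: the statement is the Claim_ definition above) =====
theorem jsc_change_quotes_spec : Claim_equal_jsc_change_quotes := by
  intro jsc _
  unfold Spec_jsc_change_quotes
  rw [pvA_eq, pvB_eq]
  exact congrArg String.ofList ((pvEmitSpans jsc.toList "" 0 0 le_rfl).1)
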